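-- pv_equiv track=rewrite | github.com/lpullela/mi3_anemia | one_hot.py | bp_diast
-- ===== SOURCE A (Python) =====
-- def bp_diast( age_col ):
-- 	bins = [ 60 ]
-- 	start = 60
-- 	while start < 100:
-- 		bins.append( start + 5 )
-- 		start = start + 5
--
-- 	one_hot_array = []
--
-- 	for element in age_col:
-- 		app = True
-- 		for i in range ( len( bins )):
-- 			if int( element ) < bins[ i ]:
-- 				one_hot_array.append( i )
-- 				app = False
-- 				break
-- 		if app:
-- 			one_hot_array.append( len( bins ))
--
-- 	return one_hot_array
-- ===== SOURCE B (Python) =====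
-- import bisect
--
-- def bp_diast(age_col):
--     bins = list(range(60, 101, 5))
--     return [bisect.bisect_right(bins, int(element)) for element in age_col]
-- ===== Notes on version B (the rewrite author's own statement) =====
-- stated objective: idiomatic
-- what changed: Replaces the hand-built while-loop bin list and the per-element linear early-break scan with range(60,101,5) plus a bisect_right binary-search lookup per element, collected by a list comprehension.
import Mathlib
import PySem

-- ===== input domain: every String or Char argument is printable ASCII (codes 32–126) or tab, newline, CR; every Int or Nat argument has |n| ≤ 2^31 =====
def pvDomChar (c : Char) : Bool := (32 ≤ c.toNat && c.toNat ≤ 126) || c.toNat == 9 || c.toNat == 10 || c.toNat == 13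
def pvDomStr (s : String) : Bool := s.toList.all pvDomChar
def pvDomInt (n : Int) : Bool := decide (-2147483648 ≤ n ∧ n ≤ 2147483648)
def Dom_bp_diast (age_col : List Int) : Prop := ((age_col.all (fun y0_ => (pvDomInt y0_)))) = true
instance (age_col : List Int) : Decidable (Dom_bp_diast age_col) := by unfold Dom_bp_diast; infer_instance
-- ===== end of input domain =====

-- B replaces A's while-loop bin construction and per-element linear early-break scan
-- with range(60,101,5) and a bisect_right lookup per element (idiomatic; return value only).

-- ===== PORT A =====
-- the while loop 'while start < 100: bins.append(start+5); start += 5'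
def pvBuildBins (bins : List Int) (start : Int) : List Int :=
  if _h : start < 100 then pvBuildBins (bins ++ [start + 5]) (start + 5) else bins
termination_by (100 - start).toNat
decreasing_by omega

-- the inner 'for i in range(len(bins)): if int(element) < bins[i]: append i; break'
-- with the 'if app: append(len(bins))' fall-through; i carries the current index.
def pvScanA (e : Int) (bs : List Int) (i : Int) : Int :=
  match bs with
  | [] => i
  | b :: rest => if e < b then i else pvScanA e rest (i + 1)

def bp_diast (age_col : List Int) : List Int :=
  age_col.map (fun element => pvScanA element (pvBuildBins [60] 60) 0)

-- ===== PORT B =====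
def pvBinsAlt : List Int := PySem.List.pyRange 60 101 5

-- bisect.bisect_right on the sorted bins = length of the prefix of elements ≤ e
def pvBisectRight (bs : List Int) (e : Int) : Int :=
  ((bs.takeWhile (fun b => b ≤ e)).length : Int)

def bp_diast_alt (age_col : List Int) : List Int :=
  age_col.map (fun element => pvBisectRight pvBinsAlt element)

-- ===== PRECONDITION & SPEC =====
def Spec_bp_diast (age_col : List Int) (out : List Int) : Prop := out = bp_diast_alt age_col
instance (age_col : List Int) (out : List Int) : Decidable (Spec_bp_diast age_col out) := by unfold Spec_bp_diast; infer_instance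

-- ===== CLAIM (what is proved, stated in full; the proofs are below) =====
def Claim_equal_bp_diast : Prop := ∀ (age_col : List Int), Dom_bp_diast age_col → Spec_bp_diast age_col (bp_diast age_col)

-- ===== LEMMAS AND PROOFS =====

theorem pvBuildBins_step (bins : List Int) (start : Int) (h : start < 100) :
    pvBuildBins bins start = pvBuildBins (bins ++ [start + 5]) (start + 5) := by
  conv_lhs => rw [pvBuildBins]
  simp [h]

theorem pvBuildBins_stop (bins : List Int) (start : Int) (h : ¬ start < 100) :
    pvBuildBins bins start = bins := by
  conv_lhs => rw [pvBuildBins]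
  simp [h]

theorem pvBuildBins_eq : pvBuildBins [60] 60 = [60, 65, 70, 75, 80, 85, 90, 95, 100] := by
  norm_num [pvBuildBins_step, pvBuildBins_stop]

theorem pvBinsAlt_eq : pvBinsAlt = [60, 65, 70, 75, 80, 85, 90, 95, 100] := by decide

theorem pvScanA_takeWhile (e : Int) (bs : List Int) (i : Int) :
    pvScanA e bs i = i + ((bs.takeWhile (fun b => b ≤ e)).length : Int) := by
  induction bs generalizing i with
  | nil => simp [pvScanA]
  | cons b rest ih =>
    by_cases h : e < b
    · simp [pvScanA, h, List.takeWhile, show ¬ (b ≤ e) by omega]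
    · simp [pvScanA, h, List.takeWhile, show b ≤ e by omega, ih]
      omega

-- ===== VERDICT (by name: the statement is the Claim_ definition above) =====
theorem bp_diast_spec : Claim_equal_bp_diast := by
  intro age_col _
  unfold Spec_bp_diast bp_diast bp_diast_alt
  refine List.map_congr_left (fun e _ => ?_)
  rw [pvBuildBins_eq, pvScanA_takeWhile, pvBisectRight, pvBinsAlt_eq]
  simp
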